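-- pv_equiv track=rewrite | github.com/dafyddstephenson/ucla-roms | mpc/passes/f77_to_f95.py | _fix_character
-- ===== SOURCE A (Python) =====
-- def _first_nonblank(text):
--     i = 0
--     while i < len(text) and text[i] in (" ", "\t"):
--         i += 1
--     return i
--
-- def _fix_character(text):
--     """
--     CHARACTER*X → CHARACTER(len=X)
--     CHARACTER(len=...) left unchanged
--     """
--     l = len(text)
--     istr = _first_nonblank(text)
--     if istr + 8 >= l:
--         return text
--
--     if text[istr:istr+9].lower() != "character":
--         return text
--
--     i = istr + 8
--     j = i + 1
--
--     while j < l and text[j] == " ":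
--         j += 1
--
--     # CHARACTER*(X) or CHARACTER*X
--     if j < l and text[j] == "*":
--         k = j + 1
--
--         # parenthesized form: CHARACTER*(10)
--         if k < l and text[k] == "(":
--             k2 = k + 1
--             while k2 < l and text[k2].isdigit():
--                 k2 += 1
--             if k2 < l and text[k2] == ")":
--                 size = text[k+1:k2]
--                 end = k2 + 1
--                 return text[:i+1] + f"(len={size})" + text[end:]
--             return text
--
--         # simple form: CHARACTER*10
--         k2 = k
--         while k2 < l and text[k2].isdigit():
--             k2 += 1
--         size = text[k:k2]
--         if size:
--             return text[:i+1] + f"(len={size})" + text[k2:]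
--         return text
--
--     # CHARACTER(...)
--     if j < l and text[j] == "(":
--         return text  # leave as-is
--
--     # default CHARACTER — MPC does NOT assign defaults
--     return text
-- ===== SOURCE B (Python) =====
-- import re
--
-- _PAREN = re.compile(r'([ \t]*character) *\*\((\d*)\)', re.IGNORECASE)
-- _SIMPLE = re.compile(r'([ \t]*character) *\*(\d+)', re.IGNORECASE)
--
-- def _fix_character(text):
--     """
--     CHARACTER*X -> CHARACTER(len=X)
--     CHARACTER(len=...) left unchanged
--     """
--     for pat in (_PAREN, _SIMPLE):
--         m = pat.match(text)
--         if m: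
--             return m.group(1) + f"(len={m.group(2)})" + text[m.end():]
--     return text
-- ===== Notes on version B (the rewrite author's own statement) =====
-- stated objective: idiomatic
-- what changed: Replaces the hand-rolled index/while-loop scanner with two anchored compiled regexes (parenthesized and simple form) whose groups rebuild the line.
import Mathlib
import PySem

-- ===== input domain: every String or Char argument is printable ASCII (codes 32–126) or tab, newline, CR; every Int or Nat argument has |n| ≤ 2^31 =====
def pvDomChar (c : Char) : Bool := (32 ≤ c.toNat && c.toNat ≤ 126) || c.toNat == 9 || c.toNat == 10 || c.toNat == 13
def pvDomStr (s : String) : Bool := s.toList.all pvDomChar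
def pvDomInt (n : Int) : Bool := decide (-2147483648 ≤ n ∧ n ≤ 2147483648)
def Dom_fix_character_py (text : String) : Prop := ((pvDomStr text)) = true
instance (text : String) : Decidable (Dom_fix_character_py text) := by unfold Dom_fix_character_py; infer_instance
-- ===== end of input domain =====

-- B rewrites A's hand-rolled index/while-loop scanner as two anchored regex-style matchers (idiomatic); same return value everywhere.

-- ===== PORT A =====
-- shared shape of A's three identical while-loops 'while i < l and P(text[i]): i += 1'
def pvScan (P : Char → Bool) (cs : List Char) (i : Nat) : Nat :=
  if h : i < cs.length then
    if P cs[i] then pvScan P cs (i + 1) else i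
  else i
termination_by cs.length - i

def fix_character_py (text : String) : String :=
  let cs := text.toList
  let l := cs.length
  let istr := pvScan (fun c => c == ' ' || c == '\t') cs 0   -- _first_nonblank(text)
  if istr + 8 ≥ l then text
  else if PySem.Chars.lower ((cs.drop istr).take 9) ≠ "character".toList then text
    -- text[istr:istr+9].lower() != "character"; slice bounds are nonnegative here, so drop/take is exact
  else
    let i := istr + 8
    let j := pvScan (fun c => c == ' ') cs (i + 1)
    if cs[j]? = some '*' then         -- 'j < l and text[j] == "*"'
      let k := j + 1
      if cs[k]? = some '(' then       -- 'k < l and text[k] == "("'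
        let k2 := pvScan PySem.Chars.isdigit cs (k + 1)
        if cs[k2]? = some ')' then    -- 'k2 < l and text[k2] == ")"'
          let size := (cs.drop (k + 1)).take (k2 - (k + 1))   -- text[k+1:k2]
          String.ofList (cs.take (i + 1) ++ "(len=".toList ++ size ++ [')'] ++ cs.drop (k2 + 1))
        else text
      else
        let k2 := pvScan PySem.Chars.isdigit cs k
        let size := (cs.drop k).take (k2 - k)                 -- text[k:k2]
        if size ≠ [] then
          String.ofList (cs.take (i + 1) ++ "(len=".toList ++ size ++ [')'] ++ cs.drop k2)
        else text
    else if cs[j]? = some '(' then text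
    else text

-- ===== PORT B =====
-- Hand port of Source B's two anchored regexes (PySem has no regex); exact here because every
-- sub-pattern is deterministic (blanks/spaces are not letters, digits are not ')' — greedy
-- pieces never backtrack). The common prefix '([ \t]*character) *' is pvGroup1?; the two
-- pattern tails are pvParenTail / pvSimpleTail.

-- '([ \t]*character) *' with re.IGNORECASE: some (group 1, what follows the consumed gap)
def pvGroup1? (cs : List Char) : Option (List Char × List Char) :=
  let w := cs.takeWhile (fun c => c == ' ' || c == '\t')
  let r := cs.dropWhile (fun c => c == ' ' || c == '\t')
  if 9 ≤ r.length then
    if PySem.Chars.lower (r.take 9) = "character".toList then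
      some (w ++ r.take 9, (r.drop 9).dropWhile (· == ' '))
    else none
  else none

-- tail '\*\((\d*)\)': some (group 2, what follows the whole match)
def pvParenTail : List Char → Option (List Char × List Char)
  | '*' :: '(' :: v =>
    (match v.dropWhile PySem.Chars.isdigit with
     | ')' :: f => some (v.takeWhile PySem.Chars.isdigit, f)
     | _ => none)
  | _ => none

-- tail '\*(\d+)': some (group 2, what follows the whole match)
def pvSimpleTail : List Char → Option (List Char × List Char)
  | '*' :: v =>
    (let ds := v.takeWhile PySem.Chars.isdigit
     if ds ≠ [] then some (ds, v.dropWhile PySem.Chars.isdigit) else none)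
  | _ => none

-- m.group(1) + f"(len={m.group(2)})" + text[m.end():]
def pvEmit (g1 ds rest : List Char) : String :=
  String.ofList (g1 ++ "(len=".toList ++ ds ++ [')'] ++ rest)

def fix_character_py_alt (text : String) : String :=
  match pvGroup1? text.toList with
  | none => text
  | some (g1, rest) =>
    match pvParenTail rest with
    | some (ds, f) => pvEmit g1 ds f
    | none =>
      match pvSimpleTail rest with
      | some (ds, f) => pvEmit g1 ds f
      | none => text

-- ===== PRECONDITION & SPEC =====
def Spec_fix_character_py (text : String) (out : String) : Prop := out = fix_character_py_alt text
instance (text : String) (out : String) : Decidable (Spec_fix_character_py text out) := by unfold Spec_fix_character_py; infer_instance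

-- ===== CLAIM (what is proved, stated in full; the proofs are below) =====
def Claim_equal_fix_character_py : Prop := ∀ (text : String), Dom_fix_character_py text → Spec_fix_character_py text (fix_character_py text)

-- ===== LEMMAS AND PROOFS =====

lemma pvScan_spec (P : Char → Bool) (cs : List Char) (i : Nat) :
    pvScan P cs i = i + ((cs.drop i).takeWhile P).length := by
  fun_induction pvScan P cs i with
  | case1 i h hp ih =>
    rw [List.drop_eq_getElem_cons h, List.takeWhile_cons, if_pos hp]
    simp [ih]
    try omega
  | case2 i h hp =>
    rw [List.drop_eq_getElem_cons h, List.takeWhile_cons, if_neg hp]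
    simp
  | case3 i h =>
    rw [List.drop_eq_nil_of_le (by omega)]
    simp

lemma drop_len_takeWhile (P : Char → Bool) (l : List Char) :
    l.drop (l.takeWhile P).length = l.dropWhile P := by
  induction l with
  | nil => rfl
  | cons a t ih => by_cases h : P a <;> simp [h, ih]

lemma take_len_takeWhile (P : Char → Bool) (l : List Char) :
    l.take (l.takeWhile P).length = l.takeWhile P := by
  induction l with
  | nil => rfl
  | cons a t ih => by_cases h : P a <;> simp [h, ih]

lemma drop_cons_succ (cs : List Char) (j : Nat) (c : Char) (u : List Char)
    (h : cs.drop j = c :: u) : cs.drop (j + 1) = u := by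
  rw [← List.tail_drop, h]; rfl

lemma getElem?_eq_drop_head (l : List Char) (i : Nat) : l[i]? = (l.drop i)[0]? := by
  rw [List.getElem?_drop]; simp

-- pvParenTail / pvSimpleTail on the shapes the proof distinguishes
lemma parenTail_close (v f : List Char) (hv : v.dropWhile PySem.Chars.isdigit = ')' :: f) :
    pvParenTail ('*' :: '(' :: v) = some (v.takeWhile PySem.Chars.isdigit, f) := by
  simp [pvParenTail, hv]

lemma parenTail_noclose (v : List Char) (hv : ∀ f, v.dropWhile PySem.Chars.isdigit ≠ ')' :: f) :
    pvParenTail ('*' :: '(' :: v) = none := by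
  rw [pvParenTail.eq_def]
  split
  · rename_i heq
    injection heq with h1 h2
    injection h2 with h3 h4
    subst h4
    split
    · rename_i f heq2; exact absurd heq2 (hv f)
    · rfl
  · rfl

lemma parenTail_nolparen (c : Char) (v : List Char) (hc : c ≠ '(') :
    pvParenTail ('*' :: c :: v) = none := by
  rw [pvParenTail.eq_def]
  split
  · rename_i heq; cases heq; exact absurd rfl hc
  · rfl

lemma parenTail_nostar (c : Char) (u : List Char) (hc : c ≠ '*') :
    pvParenTail (c :: u) = none := by
  rw [pvParenTail.eq_def]
  split
  · rename_i heq; cases heq; exact absurd rfl hc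
  · rfl

lemma simpleTail_star (v : List Char) :
    pvSimpleTail ('*' :: v) =
      (if v.takeWhile PySem.Chars.isdigit ≠ [] then
        some (v.takeWhile PySem.Chars.isdigit, v.dropWhile PySem.Chars.isdigit) else none) := by
  rfl

lemma simpleTail_nostar (c : Char) (u : List Char) (hc : c ≠ '*') :
    pvSimpleTail (c :: u) = none := by
  rw [pvSimpleTail.eq_def]
  split
  · rename_i heq; cases heq; exact absurd rfl hc
  · rfl

lemma fix_character_eq (text : String) :
    fix_character_py text = fix_character_py_alt text := by
  unfold fix_character_py fix_character_py_alt pvGroup1?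
  simp only []
  set cs := text.toList with hcs
  set B : Char → Bool := fun c => c == ' ' || c == '\t' with hB
  set w := cs.takeWhile B with hw
  set r := cs.dropWhile B with hr
  have hsplit : w ++ r = cs := List.takeWhile_append_dropWhile
  have hlen : cs.length = w.length + r.length := by
    rw [← hsplit, List.length_append]
  have histr : pvScan B cs 0 = w.length := by
    rw [pvScan_spec]; simp [hw]
  have hdrop_istr : cs.drop w.length = r := by
    rw [hw, drop_len_takeWhile, hr]
  by_cases hch9 : 9 ≤ r.length
  case neg =>
    -- header cannot match: A's 'istr + 8 >= l' guard fires, B's group-1 length test fails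
    rw [histr, if_pos (by omega), if_neg hch9]
  case pos =>
  by_cases hlow : PySem.Chars.lower (r.take 9) = "character".toList
  case neg =>
    rw [histr, if_neg (by omega), hdrop_istr, if_pos hlow, if_pos hch9, if_neg hlow]
  case pos =>
  rw [histr, if_neg (by omega), hdrop_istr, if_neg (by simp [hlow]), if_pos hch9, if_pos hlow]
  -- both headers matched; set up the space-scan landing point
  have hdrop9 : cs.drop (w.length + 9) = r.drop 9 := by
    rw [← List.drop_drop, hdrop_istr]
  have hj : pvScan (fun c => c == ' ') cs (w.length + 8 + 1)
      = w.length + 9 + ((r.drop 9).takeWhile (· == ' ')).length := by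
    rw [pvScan_spec, show w.length + 8 + 1 = w.length + 9 from rfl, hdrop9]
  have hdropj : cs.drop (pvScan (fun c => c == ' ') cs (w.length + 8 + 1))
      = (r.drop 9).dropWhile (· == ' ') := by
    rw [hj, ← List.drop_drop, hdrop9, drop_len_takeWhile]
  have htake9 : cs.take (w.length + 8 + 1) = w ++ r.take 9 := by
    rw [show w.length + 8 + 1 = w.length + 9 from rfl, ← hsplit, List.take_length_add_append]
  have hgetj : cs[pvScan (fun c => c == ' ') cs (w.length + 8 + 1)]?
      = ((r.drop 9).dropWhile (· == ' '))[0]? := by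
    rw [getElem?_eq_drop_head, hdropj]
  rcases htm : (r.drop 9).dropWhile (· == ' ') with _ | ⟨c, u⟩
  · -- nothing (or only spaces) after the keyword: both unchanged
    rw [if_neg (by rw [hgetj, htm]; simp), if_neg (by rw [hgetj, htm]; simp)]
    rfl
  by_cases hc : c = '*'
  case neg =>
    -- next char is not '*': A falls through to 'return text', B's tails reject
    have hA : (if cs[pvScan (fun c => c == ' ') cs (w.length + 8 + 1)]? = some '(' then text else text) = text := by
      split <;> rfl
    rw [if_neg (by rw [hgetj, htm]; simp [hc]), hA]
    simp [parenTail_nostar c u hc, simpleTail_nostar c u hc]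
  subst hc
  rw [if_pos (by rw [hgetj, htm]; rfl)]
  have hdropj1 : cs.drop (pvScan (fun c => c == ' ') cs (w.length + 8 + 1) + 1) = u :=
    drop_cons_succ cs _ '*' u (by rw [hdropj, htm])
  have hgetk : cs[pvScan (fun c => c == ' ') cs (w.length + 8 + 1) + 1]? = u[0]? := by
    rw [getElem?_eq_drop_head, hdropj1]
  have hk2 : pvScan PySem.Chars.isdigit cs (pvScan (fun c => c == ' ') cs (w.length + 8 + 1) + 1)
      = (pvScan (fun c => c == ' ') cs (w.length + 8 + 1) + 1) + (u.takeWhile PySem.Chars.isdigit).length := by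
    rw [pvScan_spec, hdropj1]
  have hsize : (cs.drop (pvScan (fun c => c == ' ') cs (w.length + 8 + 1) + 1)).take
      (pvScan PySem.Chars.isdigit cs (pvScan (fun c => c == ' ') cs (w.length + 8 + 1) + 1)
        - (pvScan (fun c => c == ' ') cs (w.length + 8 + 1) + 1))
      = u.takeWhile PySem.Chars.isdigit := by
    rw [hdropj1, hk2, Nat.add_sub_cancel_left, take_len_takeWhile]
  have hdropk2 : cs.drop (pvScan PySem.Chars.isdigit cs (pvScan (fun c => c == ' ') cs (w.length + 8 + 1) + 1))
      = u.dropWhile PySem.Chars.isdigit := by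
    rw [hk2, ← List.drop_drop, hdropj1, drop_len_takeWhile]
  rcases hum : u with _ | ⟨c2, v⟩
  · -- '*' is the last character: A's simple scan finds no digits, B's tails reject
    subst hum
    rw [if_neg (by rw [hgetk]; simp), if_neg (by rw [hsize]; simp)]
    rfl
  subst hum
  by_cases hc2 : c2 = '('
  case pos =>
    subst hc2
    rw [if_pos (by rw [hgetk]; rfl)]

    -- digit scan inside the parentheses
    have hdropk1 : cs.drop (pvScan (fun c => c == ' ') cs (w.length + 8 + 1) + 1 + 1) = v :=
      drop_cons_succ cs _ '(' v hdropj1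
    have hk2' : pvScan PySem.Chars.isdigit cs (pvScan (fun c => c == ' ') cs (w.length + 8 + 1) + 1 + 1)
        = (pvScan (fun c => c == ' ') cs (w.length + 8 + 1) + 1 + 1) + (v.takeWhile PySem.Chars.isdigit).length := by
      rw [pvScan_spec, hdropk1]
    have hdropk2' : cs.drop (pvScan PySem.Chars.isdigit cs (pvScan (fun c => c == ' ') cs (w.length + 8 + 1) + 1 + 1))
        = v.dropWhile PySem.Chars.isdigit := by
      rw [hk2', ← List.drop_drop, hdropk1, drop_len_takeWhile]
    have hgetk2 : cs[pvScan PySem.Chars.isdigit cs (pvScan (fun c => c == ' ') cs (w.length + 8 + 1) + 1 + 1)]?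
        = (v.dropWhile PySem.Chars.isdigit)[0]? := by
      rw [getElem?_eq_drop_head, hdropk2']
    rcases hvm : v.dropWhile PySem.Chars.isdigit with _ | ⟨c3, f⟩
    · -- no closing paren at all
      rw [if_neg (by rw [hgetk2, hvm]; simp)]
      simp [parenTail_noclose v (by rw [hvm]; intro f h; cases h), simpleTail_star,
            show PySem.Chars.isdigit '(' = false from rfl]
    by_cases hc3 : c3 = ')'
    case pos =>
      subst hc3
      rw [if_pos (by rw [hgetk2, hvm]; rfl)]
      have hsize' : (cs.drop (pvScan (fun c => c == ' ') cs (w.length + 8 + 1) + 1 + 1)).take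
          (pvScan PySem.Chars.isdigit cs (pvScan (fun c => c == ' ') cs (w.length + 8 + 1) + 1 + 1)
            - (pvScan (fun c => c == ' ') cs (w.length + 8 + 1) + 1 + 1))
          = v.takeWhile PySem.Chars.isdigit := by
        rw [hdropk1, hk2', Nat.add_sub_cancel_left, take_len_takeWhile]
      have hdropend : cs.drop (pvScan PySem.Chars.isdigit cs (pvScan (fun c => c == ' ') cs (w.length + 8 + 1) + 1 + 1) + 1) = f :=
        drop_cons_succ cs _ ')' f (by rw [hdropk2', hvm])
      rw [hsize', hdropend, htake9]
      simp [parenTail_close v f hvm, pvEmit]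
    case neg =>
      rw [if_neg (by rw [hgetk2, hvm]; simp [hc3])]
      simp [parenTail_noclose v (by rw [hvm]; intro f h; cases h; exact hc3 rfl), simpleTail_star,
            show PySem.Chars.isdigit '(' = false from rfl]
  case neg =>
    -- simple form CHARACTER*ddd (or no digits at all)
    rw [if_neg (by rw [hgetk]; simp [hc2])]
    by_cases hds : (c2 :: v).takeWhile PySem.Chars.isdigit ≠ []
    · rw [if_pos (by rw [hsize]; exact hds), hsize, hdropk2, htake9]
      simp [parenTail_nolparen c2 v hc2, simpleTail_star, hds, pvEmit]
    · rw [if_neg (by rw [hsize]; exact hds)]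
      simp [parenTail_nolparen c2 v hc2, simpleTail_star, hds]

-- ===== VERDICT (by name: the statement is the Claim_ definition above) =====
theorem fix_character_py_spec : Claim_equal_fix_character_py := by
  intro text _
  unfold Spec_fix_character_py
  exact fix_character_eq text
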